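-- pv_equiv track=rewrite | github.com/RajatAgrawal117/Sem5-Labs | InfoSecurity/revisedVigner.py | generate_key
-- ===== SOURCE A (Python) =====
-- def generate_key(plaintext, key):
--     key = list(key)
--     if len(plaintext) == len(key):
--         return key
--     else:
--         for i in range(len(plaintext) - len(key)):
--             key.append(key[i % len(key)])
--     return "".join(key)
-- ===== SOURCE B (Python) =====
-- def generate_key(plaintext, key):
--     # Replicate-and-truncate instead of A's per-character append loop.
--     # Always returns a str (A returns a list when the lengths are equal).
--     n = len(plaintext)
--     if n <= len(key):
--         return key
--     reps = n // len(key) + 1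
--     return (key * reps)[:n]
-- ===== Notes on version B (the rewrite author's own statement) =====
-- stated objective: idiomatic
-- what changed: Replaces A's per-character modulo-indexed append loop with replicating the whole key n//len(key)+1 times and truncating to len(plaintext), and returns the unmodified key whenever it is already long enough.
-- outside the precondition, e.g. on generate_key('ab', 'xy'): A returns ['x', 'y'], B returns 'xy'
import Mathlib
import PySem

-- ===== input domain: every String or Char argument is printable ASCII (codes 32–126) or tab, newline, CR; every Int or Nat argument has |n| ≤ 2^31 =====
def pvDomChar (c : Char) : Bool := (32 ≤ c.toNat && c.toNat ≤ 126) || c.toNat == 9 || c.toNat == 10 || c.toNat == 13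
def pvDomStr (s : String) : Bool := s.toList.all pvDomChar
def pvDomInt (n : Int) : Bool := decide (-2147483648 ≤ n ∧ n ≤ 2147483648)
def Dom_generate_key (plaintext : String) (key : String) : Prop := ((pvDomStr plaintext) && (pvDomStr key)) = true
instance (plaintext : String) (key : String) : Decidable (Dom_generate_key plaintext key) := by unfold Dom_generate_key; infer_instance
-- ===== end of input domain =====

-- B changes A's per-character modulo-indexed append loop into replicate-the-key-and-truncate (idiomatic; same cost).

-- ===== PORT A =====
-- Literal port of A. Python's "".join on a list of chars is String.ofList; on the
-- (excluded) equal-length branch Python returns the LIST list(key) — rendered here as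
-- the corresponding String, the closest value of the declared return type.
def generate_key (plaintext : String) (key : String) : String :=
  let keyL := key.toList
  if plaintext.toList.length = keyL.length then String.ofList keyL
  else
    String.ofList
      ((PySem.List.pyRange 0 ((plaintext.toList.length : Int) - (keyL.length : Int)) 1).foldl
        (fun acc i => acc ++ [PySem.List.pyGetD acc (PySem.Int.mod i (acc.length : Int)) ' ']) keyL)

-- ===== PORT B =====
-- Literal port of Source B: (key * reps)[:n] is flatten of reps copies, sliced to the
-- first n characters (n ≥ 0, so the slice is List.take n).
def generate_key_alt (plaintext : String) (key : String) : String :=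
  let n := plaintext.toList.length
  if n ≤ key.toList.length then key
  else
    let reps := PySem.Int.floordiv (n : Int) (key.toList.length : Int) + 1
    String.ofList ((List.replicate reps.toNat key.toList).flatten.take n)

-- ===== PRECONDITION & SPEC =====
-- Pre_ excludes (i) equal-length inputs, where A returns list(key) — a list, not a str —
-- while B returns the string key; and (ii) empty key with nonempty plaintext, where A
-- (and B) raise ZeroDivisionError.
def Pre_generate_key (plaintext : String) (key : String) : Prop :=
  plaintext.toList.length ≠ key.toList.length ∧ key ≠ ""
instance (plaintext : String) (key : String) : Decidable (Pre_generate_key plaintext key) := by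
  unfold Pre_generate_key; infer_instance

def pvWitness_generate_key : String × String := ("abcde", "ab")

def Spec_generate_key (plaintext : String) (key : String) (out : String) : Prop := out = generate_key_alt plaintext key
instance (plaintext : String) (key : String) (out : String) : Decidable (Spec_generate_key plaintext key out) := by unfold Spec_generate_key; infer_instance

-- ===== CLAIM (what is proved, stated in full; the proofs are below) =====
def Claim_equal_generate_key : Prop := ∀ (plaintext : String) (key : String), Dom_generate_key plaintext key → Pre_generate_key plaintext key → Spec_generate_key plaintext key (generate_key plaintext key)

-- ===== LEMMAS AND PROOFS =====

-- the common description of both results: n characters of the cyclic repetition of kL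
def pvCyc (kL : List Char) (n : Nat) : List Char :=
  (List.range n).map (fun j => kL.getD (j % kL.length) ' ')

theorem pv_cyc_length (kL : List Char) (n : Nat) : (pvCyc kL n).length = n := by
  simp [pvCyc]

theorem pv_cyc_getD (kL : List Char) (n j : Nat) (hj : j < n) :
    (pvCyc kL n).getD j ' ' = kL.getD (j % kL.length) ' ' := by
  unfold pvCyc
  rw [List.getD_eq_getElem?_getD, List.getElem?_map, List.getElem?_range hj]
  rfl

-- B's replicate-and-truncate equals pvCyc
theorem pv_flat_rep_getD (kL : List Char) (d : Char) (r j : Nat) (hj : j < r * kL.length) :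
    ((List.replicate r kL).flatten).getD j d = kL.getD (j % kL.length) d := by
  induction r generalizing j with
  | zero => simp at hj
  | succ r ih =>
    have hmul : (r + 1) * kL.length = r * kL.length + kL.length := Nat.succ_mul r kL.length
    simp only [List.replicate_succ, List.flatten_cons]
    by_cases hjk : j < kL.length
    · rw [List.getD_eq_getElem?_getD, List.getElem?_append_left hjk,
        ← List.getD_eq_getElem?_getD, Nat.mod_eq_of_lt hjk]
    · rw [Nat.not_lt] at hjk
      rw [List.getD_eq_getElem?_getD, List.getElem?_append_right hjk,
        ← List.getD_eq_getElem?_getD, ih (j - kL.length) (by omega)]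
      conv_rhs => rw [show j = (j - kL.length) + kL.length from by omega, Nat.add_mod_right]

theorem pv_B_cyc (kL : List Char) (n : Nat) (hk : kL ≠ []) :
    ((List.replicate (n / kL.length + 1) kL).flatten.take n) = pvCyc kL n := by
  have hk' : 0 < kL.length := List.length_pos_of_ne_nil hk
  have hmul : (n / kL.length + 1) * kL.length = n / kL.length * kL.length + kL.length :=
    Nat.succ_mul _ _
  have hdm : n / kL.length * kL.length + n % kL.length = n := Nat.div_add_mod' n kL.length
  have hmod := Nat.mod_lt n hk'
  have hlen : n ≤ (n / kL.length + 1) * kL.length := by omega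
  have hflatlen : ((List.replicate (n / kL.length + 1) kL).flatten).length
      = (n / kL.length + 1) * kL.length := by simp
  apply List.ext_getElem
  · simp [pv_cyc_length]; omega
  · intro i h1 h2
    have hi : i < n := by
      rw [pv_cyc_length] at h2; exact h2
    have hflat : i < ((List.replicate (n / kL.length + 1) kL).flatten).length := by
      rw [hflatlen]; omega
    rw [List.getElem_take, ← List.getD_eq_getElem _ ' ' hflat,
      ← List.getD_eq_getElem _ ' ' (by rw [pv_cyc_length]; exact hi),
      pv_flat_rep_getD kL ' ' _ i (by rw [hflatlen] at hflat; omega), pv_cyc_getD kL n i hi]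

-- A's loop equals pvCyc
theorem pv_A_cyc (kL : List Char) (hk : 0 < kL.length) (m : Nat) :
    (PySem.List.pyRange 0 (m : Int) 1).foldl
      (fun acc i => acc ++ [PySem.List.pyGetD acc (PySem.Int.mod i (acc.length : Int)) ' ']) kL
    = pvCyc kL (kL.length + m) := by
  induction m with
  | zero =>
    rw [PySem.List.pyRange_one_eq_nil (by omega)]
    simp only [List.foldl_nil]
    apply List.ext_getElem
    · simp [pv_cyc_length]
    · intro i h1 h2
      rw [← List.getD_eq_getElem _ ' ' h1, ← List.getD_eq_getElem _ ' ' h2,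
        pv_cyc_getD kL _ i (by rw [pv_cyc_length] at h2; exact h2),
        Nat.mod_eq_of_lt h1]
  | succ m ih =>
    have hcast : ((m + 1 : Nat) : Int) = (m : Int) + 1 := by push_cast; ring
    rw [hcast, PySem.List.pyRange_one_succ_right (by omega), List.foldl_append, ih]
    simp only [List.foldl_cons, List.foldl_nil]
    rw [pv_cyc_length, PySem.Int.mod_natCast m (kL.length + m),
      Nat.mod_eq_of_lt (show m < kL.length + m from by omega), PySem.List.pyGetD_natCast,
      pv_cyc_getD kL (kL.length + m) m (by omega)]
    -- both sides: pvCyc (len+m) ++ [kL[m % len]] = pvCyc (len+m+1)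
    unfold pvCyc
    rw [show kL.length + (m + 1) = (kL.length + m) + 1 from by omega,
      List.range_succ, List.map_append]
    simp only [List.map_cons, List.map_nil]
    rw [Nat.add_mod_left kL.length m]

theorem generate_key_eq (plaintext key : String) (h : Pre_generate_key plaintext key) :
    generate_key plaintext key = generate_key_alt plaintext key := by
  obtain ⟨hne, hkey⟩ := h
  have hk0 : key.toList ≠ [] := fun hc => hkey (by
    have := congrArg String.ofList hc; simpa using this)
  have hk : 0 < key.toList.length := List.length_pos_of_ne_nil hk0
  unfold generate_key generate_key_alt
  simp only [if_neg hne]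
  by_cases hle : plaintext.toList.length ≤ key.toList.length
  · -- n < k: A's range is empty, B returns key
    rw [if_pos hle, PySem.List.pyRange_one_eq_nil (by
      have : (plaintext.toList.length : Int) ≤ (key.toList.length : Int) := by exact_mod_cast hle
      omega)]
    simp
  · rw [Nat.not_le] at hle
    rw [if_neg (by omega)]
    set n := plaintext.toList.length with hn
    set k := key.toList.length with hkk
    have hsub : (n : Int) - (k : Int) = ((n - k : Nat) : Int) := by
      omega
    rw [hsub, pv_A_cyc key.toList hk (n - k),
      show k + (n - k) = n from by omega]
    have hdiv : (PySem.Int.floordiv (n : Int) (k : Int) + 1).toNat = n / k + 1 := by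
      rw [PySem.Int.floordiv_natCast,
        show ((n / k : Nat) : Int) + 1 = ((n / k + 1 : Nat) : Int) from by norm_cast,
        Int.toNat_natCast]
    rw [hdiv, pv_B_cyc key.toList n hk0]

-- ===== VERDICT (by name: the statement is the Claim_ definition above) =====
theorem generate_key_spec : Claim_equal_generate_key := by
  intro plaintext key _ hpre
  exact generate_key_eq plaintext key hpre
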